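-- pv_equiv track=rewrite | github.com/AliRashwan11/Password-Generator-And-Validator-With-GUI | project.py | check_generated_password
-- ===== SOURCE A (Python) =====
-- def check_generated_password(password,keyword,test_list):
--
--     #----Making A String From The words_list----
--     temp_password=""
--     for word in test_list:
--         temp_password+=word
--
--
--     #-----Checking They Have Same Length----
--     if not len(password)==len(temp_password):
--         return False
--
--     #----Making A List Of All Letters In temp_password----
--     letters_list=[]
--     for letter in temp_password:
--         letters_list.append(letter)
--
--     #----Checking If Password And temp_password Have Same Characters----
--     for letter in password:
--         if letter in letters_list:
--             letters_list.remove(letter)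
--         else:
--             return False
--
--     #----If Passed All Checks----
--     return True
-- ===== SOURCE B (Python) =====
-- def check_generated_password(password, keyword, test_list):
--     temp_password = "".join(test_list)
--     return sorted(password) == sorted(temp_password)
-- ===== Notes on version B (the rewrite author's own statement) =====
-- stated objective: simpler
-- what changed: Replaces the length guard plus per-character membership/remove scan over a mutable letter list with a single sort-and-compare of the password and the joined test_list.
import Mathlib
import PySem

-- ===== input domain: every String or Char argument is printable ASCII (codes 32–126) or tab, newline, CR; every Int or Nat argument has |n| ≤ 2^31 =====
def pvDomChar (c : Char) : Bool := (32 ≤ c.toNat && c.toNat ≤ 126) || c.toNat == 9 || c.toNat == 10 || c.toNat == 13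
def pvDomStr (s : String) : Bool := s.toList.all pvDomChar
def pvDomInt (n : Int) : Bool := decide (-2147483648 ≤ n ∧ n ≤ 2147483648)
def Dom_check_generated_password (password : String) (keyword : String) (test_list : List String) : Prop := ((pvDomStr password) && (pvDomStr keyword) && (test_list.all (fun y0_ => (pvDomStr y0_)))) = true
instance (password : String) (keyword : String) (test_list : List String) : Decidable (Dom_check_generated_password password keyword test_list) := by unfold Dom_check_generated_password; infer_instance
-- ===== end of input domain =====

-- B replaces A's length guard and per-character membership/remove loop with sort-and-compare (simpler).

-- ===== PORT A =====
-- the "for letter in password: if letter in letters_list: letters_list.remove(letter) else return False" loop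
def pvCheckLoopA : List Char → List Char → Bool
  | [], _ => true
  | c :: rest, letters =>
    match PySem.List.remove? letters c with
    | some letters' => pvCheckLoopA rest letters'
    | none => false

def check_generated_password (password : String) (keyword : String) (test_list : List String) : Bool :=
  -- temp_password = ""; for word in test_list: temp_password += word   (kept as List Char)
  let temp_password : List Char := test_list.foldl (fun acc w => acc ++ w.toList) []
  if !(password.toList.length == temp_password.length) then false
  else
    -- letters_list = []; for letter in temp_password: letters_list.append(letter)
    let letters_list : List Char := temp_password.foldl (fun acc c => acc ++ [c]) []
    pvCheckLoopA password.toList letters_list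

-- ===== PORT B =====
def check_generated_password_alt (password : String) (keyword : String) (test_list : List String) : Bool :=
  let temp_password := PySem.Str.join "" test_list
  PySem.List.sorted password.toList (fun x => x) == PySem.List.sorted temp_password.toList (fun x => x)

-- ===== PRECONDITION & SPEC =====
def Spec_check_generated_password (password : String) (keyword : String) (test_list : List String) (out : Bool) : Prop := out = check_generated_password_alt password keyword test_list
instance (password : String) (keyword : String) (test_list : List String) (out : Bool) : Decidable (Spec_check_generated_password password keyword test_list out) := by unfold Spec_check_generated_password; infer_instance

-- ===== CLAIM (what is proved, stated in full; the proofs are below) =====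
def Claim_equal_check_generated_password : Prop := ∀ (password : String) (keyword : String) (test_list : List String), Dom_check_generated_password password keyword test_list → Spec_check_generated_password password keyword test_list (check_generated_password password keyword test_list)

-- ===== LEMMAS AND PROOFS =====

lemma pvFoldlAppendToList (l : List String) (acc : List Char) :
    l.foldl (fun a w => a ++ w.toList) acc = acc ++ l.flatMap String.toList := by
  induction l generalizing acc with
  | nil => simp
  | cons w rest ih => simp [List.foldl, ih, List.append_assoc]

lemma pvFoldlCopy (l acc : List Char) :
    l.foldl (fun a c => a ++ [c]) acc = acc ++ l := by
  induction l generalizing acc with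
  | nil => simp
  | cons c rest ih => simp [List.foldl, ih]

lemma pvJoinEmpty (parts : List (List Char)) :
    PySem.Chars.join [] parts = parts.flatten := by
  induction parts with
  | nil => simp [PySem.Chars.join_nil]
  | cons p rest ih =>
    cases rest with
    | nil => simp [PySem.Chars.join_singleton]
    | cons q r => simp [PySem.Chars.join_cons_cons, ih]

lemma pvLoopA_perm (p : List Char) : ∀ letters : List Char, p.length = letters.length →
    (pvCheckLoopA p letters = true ↔ p.Perm letters) := by
  induction p with
  | nil =>
    intro letters h
    have : letters = [] := List.eq_nil_of_length_eq_zero h.symm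
    simp [this, pvCheckLoopA]
  | cons c rest ih =>
    intro letters h
    by_cases hc : c ∈ letters
    · rw [List.cons_perm_iff_perm_erase]
      have hl : rest.length = (letters.erase c).length := by
        rw [List.length_erase_of_mem hc]
        simp at h; omega
      simp [pvCheckLoopA, PySem.List.remove?_eq_some_erase letters c hc, ih _ hl, hc]
    · have : PySem.List.remove? letters c = none :=
        (PySem.List.remove?_eq_none_iff letters c).mpr hc
      simp only [pvCheckLoopA, this]
      constructor
      · intro h'; exact absurd h' (by simp)
      · intro hperm; exact absurd (hperm.mem_iff.mp (by simp)) hc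

lemma pvB_iff (password : String) (test_list : List String) :
    check_generated_password_alt password "" test_list = true ↔
      password.toList.Perm (test_list.flatMap String.toList) := by
  unfold check_generated_password_alt
  rw [beq_iff_eq]
  rw [show (PySem.Str.join "" test_list).toList = test_list.flatMap String.toList by
    rw [PySem.Str.toList_join, show "".toList = ([] : List Char) from rfl,
      pvJoinEmpty]
    simp [List.flatMap_def]]
  exact PySem.List.sorted_id_eq_sorted_id_iff_perm _ _

lemma pvAltKeywordIrrel (password k1 k2 : String) (test_list : List String) :
    check_generated_password_alt password k1 test_list = check_generated_password_alt password k2 test_list := rfl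

theorem pvMain (password keyword : String) (test_list : List String) :
    check_generated_password password keyword test_list =
      check_generated_password_alt password keyword test_list := by
  rw [Bool.eq_iff_iff]
  rw [pvAltKeywordIrrel password keyword "" test_list, pvB_iff]
  unfold check_generated_password
  simp only [pvFoldlAppendToList, List.nil_append, pvFoldlCopy]
  by_cases hlen : password.toList.length = (test_list.flatMap String.toList).length
  · simp only [hlen, beq_self_eq_true, Bool.not_true, Bool.false_eq_true, if_false]
    exact pvLoopA_perm password.toList _ hlen
  · have hb : (password.toList.length == (test_list.flatMap String.toList).length) = false := by
      simpa using hlen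
    rw [hb]
    simp only [Bool.not_false, if_pos]
    constructor
    · intro h; exact absurd h (by simp)
    · intro hperm; exact absurd hperm.length_eq hlen

-- ===== VERDICT (by name: the statement is the Claim_ definition above) =====
theorem check_generated_password_spec : Claim_equal_check_generated_password := by
  intro password keyword test_list _
  exact pvMain password keyword test_list
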